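-- pv_equiv track=rewrite | github.com/lorenzomlazzarin/trabalho_1_sc_unb_vigenere_cipher | Vigenere_cifra.py | frequenciaOcorrencias
-- ===== SOURCE A (Python) =====
-- def frequenciaOcorrencias(msg_sem_caracteres_especiais):
--     frequencia_ocorrencias = dict()
--     # move o texto para esquerda
--     for x in range(1, len(msg_sem_caracteres_especiais)):
--         contador = 0
--         quentidade_ocorrencia = 0
--         # grava as ocorrencias de caracteres iguais em dicionário (deslocamento:ocorrencias)
--         for i in range(x, len(msg_sem_caracteres_especiais)):
--             if msg_sem_caracteres_especiais[i] == msg_sem_caracteres_especiais[contador]: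
--                 quentidade_ocorrencia += 1
--             contador += 1
--         frequencia_ocorrencias[x] = quentidade_ocorrencia
--     # retorna uma tupla organizada pelas linhas com maior ocorrencia de itens iguais
--     return sorted(frequencia_ocorrencias.items(), key=lambda x: x[1], reverse=True)
-- ===== SOURCE B (Python) =====
-- def frequenciaOcorrencias(msg_sem_caracteres_especiais):
--     # Index the text once: positions of each character, grouped by character.
--     # Only positions of the SAME character can ever match, so the shift counts
--     # are the pairwise position differences within each group; no character
--     # comparison is done in the quadratic part at all.
--     n = len(msg_sem_caracteres_especiais)
--     positions = {}
--     for i, c in enumerate(msg_sem_caracteres_especiais):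
--         positions.setdefault(c, []).append(i)
--     counts = [0] * n
--     for ps in positions.values():
--         m = len(ps)
--         for a in range(m):
--             for b in range(a + 1, m):
--                 counts[ps[b] - ps[a]] += 1
--     items = [(x, counts[x]) for x in range(1, n)]
--     items.sort(key=lambda t: t[1], reverse=True)
--     return items
-- ===== Notes on version B (the rewrite author's own statement) =====
-- stated objective: faster
-- what changed: A rescans the whole text once per shift comparing characters pairwise; B builds a positional index (dict char -> list of positions) in one pass and accumulates every shift's count from the pairwise position differences inside each equal-character group, so the quadratic part touches only matching pairs and does no character comparisons; same stable sort by count descending.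
import Mathlib
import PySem

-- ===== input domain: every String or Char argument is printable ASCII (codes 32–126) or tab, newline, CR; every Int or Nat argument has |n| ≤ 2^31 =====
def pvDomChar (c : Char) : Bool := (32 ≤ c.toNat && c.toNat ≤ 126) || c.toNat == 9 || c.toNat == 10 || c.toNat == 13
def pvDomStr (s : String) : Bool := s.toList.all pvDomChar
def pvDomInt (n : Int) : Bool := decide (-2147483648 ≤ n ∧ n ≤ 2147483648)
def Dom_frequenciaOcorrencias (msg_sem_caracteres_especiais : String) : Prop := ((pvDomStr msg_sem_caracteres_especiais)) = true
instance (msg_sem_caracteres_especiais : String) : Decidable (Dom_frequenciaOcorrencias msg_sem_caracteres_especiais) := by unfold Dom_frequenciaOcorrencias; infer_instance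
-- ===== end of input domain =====

-- B replaces A's per-shift rescans (which compare characters pairwise) by a
-- positional index built in one pass — positions grouped by character — and
-- accumulates every shift's count from pairwise position differences inside
-- each equal-character group (objective: faster; only matching pairs touched).

-- ===== PORT A =====
def frequenciaOcorrencias (msg_sem_caracteres_especiais : String) : List (Int × Int) :=
  let l := msg_sem_caracteres_especiais.toList
  let n : Int := (l.length : Int)
  let d :=
    (PySem.List.pyRange 1 n 1).foldl
      (fun (d : PySem.Dict Int Int) x =>
        d.insert x
          ((PySem.List.pyRange x n 1).foldl
            (fun (st : Int × Int) i =>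
              (st.1 + 1,
               if PySem.List.pyGet? l i == PySem.List.pyGet? l st.1 then st.2 + 1 else st.2))
            (0, 0)).2)
      PySem.Dict.empty
  PySem.List.sorted d.items (fun p => p.2) true

-- ===== PORT B =====
def frequenciaOcorrencias_alt (msg_sem_caracteres_especiais : String) : List (Int × Int) :=
  let l := msg_sem_caracteres_especiais.toList
  let n : Int := (l.length : Int)
  -- positions.setdefault(c, []).append(i)  ==  d.modify c [] (· ++ [i])  (exact)
  let positions :=
    (PySem.List.enumerate l 0).foldl
      (fun (d : PySem.Dict Char (List Int)) p => d.modify p.2 [] (fun v => v ++ [p.1]))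
      PySem.Dict.empty
  let counts :=
    positions.values.foldl
      (fun (counts : List Int) ps =>
        (PySem.List.pyRange 0 (PySem.List.len ps) 1).foldl
          (fun counts a =>
            (PySem.List.pyRange (a + 1) (PySem.List.len ps) 1).foldl
              (fun counts b =>
                PySem.List.pySetD counts (PySem.List.pyGetD ps b 0 - PySem.List.pyGetD ps a 0)
                  (PySem.List.pyGetD counts (PySem.List.pyGetD ps b 0 - PySem.List.pyGetD ps a 0) 0 + 1))
              counts)
          counts)
      (List.replicate l.length (0 : Int))
  let items := (PySem.List.pyRange 1 n 1).map (fun x => (x, PySem.List.pyGetD counts x 0))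
  PySem.List.sorted items (fun p => p.2) true

-- ===== PRECONDITION & SPEC =====
def Spec_frequenciaOcorrencias (msg_sem_caracteres_especiais : String) (out : List (Int × Int)) : Prop := out = frequenciaOcorrencias_alt msg_sem_caracteres_especiais
instance (msg_sem_caracteres_especiais : String) (out : List (Int × Int)) : Decidable (Spec_frequenciaOcorrencias msg_sem_caracteres_especiais out) := by unfold Spec_frequenciaOcorrencias; infer_instance

-- ===== CLAIM (what is proved, stated in full; the proofs are below) =====
def Claim_equal_frequenciaOcorrencias : Prop := ∀ (msg_sem_caracteres_especiais : String), Dom_frequenciaOcorrencias msg_sem_caracteres_especiais → Spec_frequenciaOcorrencias msg_sem_caracteres_especiais (frequenciaOcorrencias msg_sem_caracteres_especiais)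

-- ===== LEMMAS AND PROOFS =====

-- the common specification: number of self-matches of the text at shift x
def pvCnt (l : List Char) (x : ℕ) : ℕ :=
  (List.range (l.length - x)).countP (fun j => l[x + j]? == l[j]?)

-- positions of character c in l, as Python ints in increasing order
def pvPos (l : List Char) (c : Char) : List ℤ :=
  ((PySem.List.enumerate l 0).filter (fun p => p.2 == c)).map (fun p => p.1)

-- all pairwise later-minus-earlier differences of a list, head first
def pvDiffs : List ℤ → List ℤ
  | [] => []
  | p :: ps => ps.map (fun q => q - p) ++ pvDiffs ps

-- ---- generic loop-shape helpers ----

theorem pv_foldl_flat {α β γ : Type} (ls : List α) (g : α → List β) (f : γ → β → γ) (c : γ) :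
    ls.foldl (fun c a => (g a).foldl f c) c = (ls.flatMap g).foldl f c := by
  induction ls generalizing c with
  | nil => rfl
  | cons a ls ih => simp [List.flatMap_cons, List.foldl_append, ih]

theorem pv_count_flatMap {α β : Type} [BEq β] (ls : List α) (g : α → List β) (t : β) :
    (ls.flatMap g).count t = (ls.map (fun a => (g a).count t)).sum := by
  induction ls with
  | nil => rfl
  | cons a ls ih => simp [List.flatMap_cons, List.count_append, ih]

theorem pv_sum_ite_countP {α : Type} (xs : List α) (p : α → Bool) :
    (xs.map (fun a => if p a then (1 : ℕ) else 0)).sum = xs.countP p := by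
  induction xs with
  | nil => rfl
  | cons a xs ih =>
    by_cases h : p a <;> simp [h, ih, Nat.add_comm]

theorem pv_sum_map_add {α : Type} (xs : List α) (f g : α → ℕ) :
    (xs.map (fun a => f a + g a)).sum = (xs.map f).sum + (xs.map g).sum := by
  induction xs with
  | nil => rfl
  | cons a xs ih => simp [ih]; omega

theorem pv_sum_countP_swap {κ α : Type} (ks : List κ) (xs : List α) (Q : κ → α → Bool) :
    (ks.map (fun c => xs.countP (Q c))).sum = (xs.map (fun e => ks.countP (fun c => Q c e))).sum := by
  induction ks with
  | nil => simp
  | cons c ks ih =>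
    simp only [List.map_cons, List.sum_cons, List.countP_cons, ih]
    rw [pv_sum_map_add, pv_sum_ite_countP]
    omega

theorem pv_countP_beq_and {α : Type} [DecidableEq α] (xs : List α) (hnd : xs.Nodup)
    (t : α) (q : α → Bool) :
    xs.countP (fun a => (a == t) && q a) = if t ∈ xs ∧ q t then 1 else 0 := by
  induction xs with
  | nil => simp
  | cons a xs ih =>
    rcases List.nodup_cons.mp hnd with ⟨ha, hxs⟩
    rw [List.countP_cons, ih hxs]
    by_cases hat : a = t
    · subst hat
      by_cases hq : q a <;> simp [ha, hq]
    · have hta : t ≠ a := Ne.symm hat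
      by_cases hq : q t <;> simp [hat, hta, hq]

theorem pv_countP_filter {α : Type} (xs : List α) (p q : α → Bool) :
    (xs.filter q).countP p = xs.countP (fun a => p a && q a) := by
  induction xs with
  | nil => rfl
  | cons a xs ih =>
    by_cases hq : q a
    · by_cases hp : p a <;> simp [hq, hp, ih]
    · simp [hq, ih]

theorem pv_flatMap_map {α β γ : Type} (l : List α) (f : α → β) (g : β → List γ) :
    (l.map f).flatMap g = l.flatMap (fun x => g (f x)) := by
  induction l with
  | nil => rfl
  | cons a l ih => simp [List.flatMap_cons, ih]

theorem pv_map_getD_drop (ps : List ℤ) (k : ℕ) :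
    (List.range (ps.length - k)).map (fun t => ps.getD (k + t) 0) = ps.drop k := by
  induction ps generalizing k with
  | nil => simp
  | cons p ps ih =>
    cases k with
    | zero =>
      rw [List.length_cons, Nat.sub_zero, List.range_succ_eq_map, List.map_cons, List.map_map]
      simp only [Nat.zero_add, List.getD_cons_zero, Function.comp_def, List.getD_cons_succ,
        List.drop_zero]
      have h := ih 0
      rw [Nat.sub_zero] at h
      rw [show (fun t => ps.getD t 0) = (fun t => ps.getD (0 + t) 0) from by funext t; rw [Nat.zero_add]]
      rw [h]
      simp
    | succ k =>
      rw [List.length_cons, Nat.succ_sub_succ, List.drop_succ_cons, ← ih k]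
      apply List.map_congr_left
      intro t _
      rw [show k + 1 + t = (k + t) + 1 from by omega, List.getD_cons_succ]

-- ---- A side ----

theorem pv_A_inner (l : List Char) (x m : ℕ) :
    ((List.range m).map (fun k => ((x : ℤ) + (k : ℕ)))).foldl
      (fun (st : ℤ × ℤ) i =>
        (st.1 + 1,
         if PySem.List.pyGet? l i == PySem.List.pyGet? l st.1 then st.2 + 1 else st.2))
      (0, 0)
    = ((m : ℤ), (((List.range m).countP (fun j => l[x + j]? == l[j]?) : ℕ) : ℤ)) := by
  induction m with
  | zero => simp
  | succ m ih =>
    rw [List.range_succ, List.map_append, List.foldl_append, ih]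
    have hcast : ((x : ℤ) + ((m : ℕ) : ℤ)) = (((x + m : ℕ) : ℤ)) := by push_cast; ring
    simp only [List.map_cons, List.map_nil, List.foldl_cons, List.foldl_nil, hcast,
      PySem.List.pyGet?_natCast, List.countP_append, List.countP_cons, List.countP_nil]
    by_cases h : (l[x + m]? == l[m]?) = true <;> simp [h]

theorem pv_A_eq (s : String) :
    frequenciaOcorrencias s =
      PySem.List.sorted
        ((PySem.List.pyRange 1 (s.toList.length : ℤ) 1).map
          (fun x => (x, ((pvCnt s.toList x.toNat : ℕ) : ℤ))))
        (fun p => p.2) true := by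
  simp only [frequenciaOcorrencias]
  rw [PySem.Dict.items_foldl_insert_fresh _ (fun x => x) _ _
        (fun a _ => PySem.Dict.contains_empty a)
        (by simpa using PySem.List.nodup_pyRange_one 1 (s.toList.length : ℤ))]
  have hempty : (PySem.Dict.empty : PySem.Dict Int Int).items = [] := rfl
  rw [hempty, List.nil_append]
  congr 1
  apply List.map_congr_left
  intro x hx
  obtain ⟨hx1, hx2⟩ := PySem.List.mem_pyRange_one.mp hx
  obtain ⟨y, rfl⟩ : ∃ y : ℕ, x = (y : ℤ) := ⟨x.toNat, by omega⟩
  rw [PySem.List.pyRange_one (y : ℤ) (s.toList.length : ℤ), pv_A_inner]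
  simp only [Int.toNat_natCast, Prod.mk.injEq, true_and]
  unfold pvCnt
  have hn : ((s.toList.length : ℤ) - (y : ℤ)).toNat = s.toList.length - y := by omega
  rw [hn]

-- ---- B side: the position groups ----

theorem pv_mem_pvPos (l : List Char) (c : Char) (q : ℤ) :
    q ∈ pvPos l c ↔ ∃ k : ℕ, k < l.length ∧ q = (k : ℤ) ∧ l[k]? = some c := by
  unfold pvPos
  simp only [List.mem_map, List.mem_filter, PySem.List.mem_enumerate_iff]
  constructor
  · rintro ⟨p, ⟨⟨k, hk, rfl⟩, hc⟩, rfl⟩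
    refine ⟨k, hk, by simp, ?_⟩
    simp only [beq_iff_eq] at hc
    simp [List.getElem?_eq_getElem hk, hc]
  · rintro ⟨k, hk, rfl, hc⟩
    refine ⟨((k : ℤ), l[k]), ⟨⟨k, hk, by simp⟩, ?_⟩, rfl⟩
    rw [List.getElem?_eq_getElem hk] at hc
    simpa using Option.some.inj hc

theorem pv_pairwise_pvPos (l : List Char) (c : Char) : (pvPos l c).Pairwise (· < ·) := by
  unfold pvPos
  exact List.Pairwise.map _ (fun p q h => h)
    ((PySem.List.pairwise_lt_enumerate l 0).filter _)

theorem pv_bounds_pvPos (l : List Char) (c : Char) (q : ℤ) (hq : q ∈ pvPos l c) :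
    0 ≤ q ∧ q < (l.length : ℤ) := by
  obtain ⟨k, hk, rfl, -⟩ := (pv_mem_pvPos l c q).mp hq
  omega

-- ---- B side: pairwise differences ----

theorem pv_mem_pvDiffs_bounds (N : ℤ) (ps : List ℤ) (hp : ps.Pairwise (· < ·))
    (hb : ∀ q ∈ ps, 0 ≤ q ∧ q < N) :
    ∀ d ∈ pvDiffs ps, 0 ≤ d ∧ d < N := by
  induction ps with
  | nil => intro d hd; cases hd
  | cons p ps ih =>
    rcases List.pairwise_cons.mp hp with ⟨hlt, hp'⟩
    intro d hd
    rcases List.mem_append.mp hd with hd | hd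
    · obtain ⟨q, hq, rfl⟩ := List.mem_map.mp hd
      have h1 := hlt q hq
      have h2 := hb q (List.mem_cons_of_mem _ hq)
      have h3 := hb p List.mem_cons_self
      constructor <;> omega
    · exact ih hp' (fun q hq => hb q (List.mem_cons_of_mem _ hq)) d hd

theorem pv_count_pvDiffs (ps : List ℤ) (x : ℤ) (hx : 1 ≤ x) (hp : ps.Pairwise (· < ·)) :
    (pvDiffs ps).count x = ps.countP (fun q => decide (q + x ∈ ps)) := by
  induction ps with
  | nil => rfl
  | cons p ps ih =>
    rcases List.pairwise_cons.mp hp with ⟨hlt, hp'⟩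
    have hnd : ps.Nodup := hp'.imp (fun h => ne_of_lt h)
    rw [pvDiffs, List.count_append]
    have hinj : Function.Injective (fun q : ℤ => q - p) := by
      intro a b h
      dsimp only at h
      omega
    have hmap : (ps.map (fun q => q - p)).count x = ps.count (p + x) := by
      have h := List.count_map_of_injective (x := p + x) ps (fun q => q - p) hinj
      simpa using h
    have hone : ps.count (p + x) = if (p + x) ∈ ps then 1 else 0 := by
      by_cases h : (p + x) ∈ ps
      · simp [h, List.count_eq_one_of_mem hnd h]
      · simp [h, List.count_eq_zero_of_not_mem h]
    rw [hmap, hone, ih hp', List.countP_cons]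
    have hhead : (decide (p + x ∈ p :: ps)) = (decide (p + x ∈ ps)) := by
      apply decide_eq_decide.mpr
      constructor
      · intro h
        rcases List.mem_cons.mp h with h | h
        · exact absurd h (by omega)
        · exact h
      · intro h
        exact List.mem_cons.mpr (Or.inr h)
    have htail : ps.countP (fun q => decide (q + x ∈ p :: ps)) =
        ps.countP (fun q => decide (q + x ∈ ps)) := by
      apply List.countP_congr
      intro q hq
      have hpq := hlt q hq
      simp only [decide_eq_true_eq]
      constructor
      · intro h
        rcases List.mem_cons.mp h with h | h
        · exact absurd h (by omega)
        · exact h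
      · intro h
        exact List.mem_cons.mpr (Or.inr h)
    rw [hhead, htail]
    by_cases h : (p + x) ∈ ps
    · simp [h]
      omega
    · simp [h]

-- the nested index loops of B produce exactly pvDiffs ps
theorem pv_drop_form (ps : List ℤ) :
    (List.range ps.length).flatMap
      (fun a => (ps.drop (a + 1)).map (fun q => q - ps.getD a 0))
    = pvDiffs ps := by
  induction ps with
  | nil => rfl
  | cons p ps ih =>
    rw [List.length_cons, List.range_succ_eq_map, List.flatMap_cons, pv_flatMap_map]
    simp only [Nat.succ_eq_add_one, List.drop_succ_cons, List.getD_cons_succ, List.getD_cons_zero]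
    rw [ih]
    rfl

theorem pv_diffs_port (ps : List ℤ) :
    (PySem.List.pyRange 0 (PySem.List.len ps) 1).flatMap
      (fun a => (PySem.List.pyRange (a + 1) (PySem.List.len ps) 1).map
        (fun b => PySem.List.pyGetD ps b 0 - PySem.List.pyGetD ps a 0))
    = pvDiffs ps := by
  rw [PySem.List.len_eq, ← pv_drop_form]
  rw [show PySem.List.pyRange 0 (ps.length : ℤ) 1
        = (List.range ps.length).map (fun k => ((k : ℕ) : ℤ)) from by
    rw [PySem.List.pyRange_one]
    rw [show (((ps.length : ℤ)) - 0).toNat = ps.length from by omega]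
    apply List.map_congr_left
    intro k _
    omega]
  rw [pv_flatMap_map]
  apply List.flatMap_congr
  intro a ha
  have haa : a < ps.length := List.mem_range.mp ha
  rw [PySem.List.pyRange_one]
  rw [show (((ps.length : ℤ)) - (((a : ℕ) : ℤ) + 1)).toNat = ps.length - (a + 1) from by omega]
  rw [← pv_map_getD_drop ps (a + 1), List.map_map, List.map_map]
  apply List.map_congr_left
  intro t _
  simp only [Function.comp_apply]
  rw [show ((a : ℕ) : ℤ) + 1 + ((t : ℕ) : ℤ) = (((a + 1 + t : ℕ)) : ℤ) from by push_cast; ring]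
  simp only [PySem.List.pyGetD_natCast, List.getD]

-- ---- B side: the dictionary of position groups ----

theorem pv_grp_values (l : List Char) :
    ((PySem.List.enumerate l 0).foldl
      (fun (d : PySem.Dict Char (List Int)) p => d.modify p.2 [] (fun v => v ++ [p.1]))
      PySem.Dict.empty).values
    = (PySem.Set.ofList l).map (fun c => pvPos l c) := by
  have hkeys :
      ((PySem.List.enumerate l 0).foldl
        (fun (d : PySem.Dict Char (List Int)) p => d.modify p.2 [] (fun v => v ++ [p.1]))
        PySem.Dict.empty).keys = PySem.Set.ofList l := by
    have h := PySem.Dict.keys_foldl_modify_key (PySem.List.enumerate l 0)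
      (fun p : ℤ × Char => p.2) ([] : List Int) (fun _ p _v => _v ++ [p.1]) PySem.Dict.empty
    rw [PySem.List.map_snd_enumerate] at h
    exact h.trans (by rw [PySem.Set.ofList_eq_foldl]; rfl)
  have hnodup :
      ((PySem.List.enumerate l 0).foldl
        (fun (d : PySem.Dict Char (List Int)) p => d.modify p.2 [] (fun v => v ++ [p.1]))
        PySem.Dict.empty).keys.Nodup :=
    PySem.Dict.nodup_keys_foldl_modify_key (PySem.List.enumerate l 0)
      (fun p : ℤ × Char => p.2) ([] : List Int) (fun _ p _v => _v ++ [p.1]) PySem.Dict.empty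
      PySem.Dict.nodup_keys_empty
  have hgetD : ∀ c,
      ((PySem.List.enumerate l 0).foldl
        (fun (d : PySem.Dict Char (List Int)) p => d.modify p.2 [] (fun v => v ++ [p.1]))
        PySem.Dict.empty).getD c [] = pvPos l c := by
    intro c
    have hswap :
        (PySem.List.enumerate l 0).foldl
          (fun (d : PySem.Dict Char (List Int)) p => d.modify p.2 [] (fun v => v ++ [p.1]))
          PySem.Dict.empty
        = (((PySem.List.enumerate l 0).map (fun p => (p.2, p.1))).foldl
            (fun (d : PySem.Dict Char (List Int)) q => d.modify q.1 [] (fun v => v ++ [q.2]))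
            PySem.Dict.empty) := by
      rw [List.foldl_map]
    rw [hswap, PySem.Dict.getD_foldl_modify_append, PySem.Dict.getD_empty, List.nil_append]
    unfold pvPos
    rw [List.filter_map, List.map_map]
    rfl
  rw [PySem.Dict.values_eq_map_keys _ hnodup ([] : List Int), hkeys]
  apply List.map_congr_left
  intro c _
  rw [hgetD]

-- ---- B side: reading the accumulator ----

theorem pv_read_fold (ds : List ℤ) (c : List ℤ) (x : ℤ) (hx : 0 ≤ x) (hx2 : x < (c.length : ℤ))
    (hds : ∀ d ∈ ds, 0 ≤ d ∧ d < (c.length : ℤ)) :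
    PySem.List.pyGetD (ds.foldl (fun c d => PySem.List.pySetD c d (PySem.List.pyGetD c d 0 + 1)) c) x 0
    = PySem.List.pyGetD c x 0 + ((ds.count x : ℕ) : ℤ) := by
  induction ds generalizing c with
  | nil => simp
  | cons d ds ih =>
    obtain ⟨hd0, hdlen⟩ := hds d List.mem_cons_self
    have hlen : (PySem.List.pySetD c d (PySem.List.pyGetD c d 0 + 1)).length = c.length :=
      PySem.List.length_pySetD c d _
    rw [List.foldl_cons,
      ih _ (by rw [hlen]; exact hx2) (fun e he => by rw [hlen]; exact hds e (List.mem_cons_of_mem _ he))]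
    obtain ⟨dn, rfl⟩ : ∃ dn : ℕ, d = (dn : ℤ) := ⟨d.toNat, by omega⟩
    obtain ⟨xn, rfl⟩ : ∃ xn : ℕ, x = (xn : ℤ) := ⟨x.toNat, by omega⟩
    rw [PySem.List.pyGetD_pySetD_natCast c dn xn _ _ (by omega)]
    by_cases hxd : xn = dn
    · subst hxd
      simp
      ring
    · have : ((dn : ℤ) == (xn : ℤ)) = false := by simp; omega
      simp [List.count_cons, hxd, this]

-- ---- B side: total count at a shift ----

theorem pv_count_total (l : List Char) (y : ℕ) (hy1 : 1 ≤ y) (hy2 : y < l.length) :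
    (((PySem.Set.ofList l).map (fun c => pvPos l c)).flatMap pvDiffs).count ((y : ℕ) : ℤ)
    = pvCnt l y := by
  have hR : ∀ (c : Char),
      (pvDiffs (pvPos l c)).count ((y : ℕ) : ℤ)
      = (PySem.List.enumerate l 0).countP
          (fun e => (decide (e.1 + (y : ℤ) < (l.length : ℤ)) &&
            (l[(e.1 + (y : ℤ)).toNat]? == l[e.1.toNat]?)) && (e.2 == c)) := by
    intro c
    rw [pv_count_pvDiffs (pvPos l c) _ (by omega) (pv_pairwise_pvPos l c)]
    have hcong : (pvPos l c).countP (fun q => decide (q + ((y : ℕ) : ℤ) ∈ pvPos l c))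
        = (pvPos l c).countP (fun q => decide (q + (y : ℤ) < (l.length : ℤ)) &&
            (l[(q + (y : ℤ)).toNat]? == l[q.toNat]?)) := by
      apply List.countP_congr
      intro q hq
      obtain ⟨k, hk, rfl, hc⟩ := (pv_mem_pvPos l c q).mp hq
      simp only [decide_eq_true_eq, Bool.and_eq_true, beq_iff_eq]
      rw [pv_mem_pvPos]
      constructor
      · rintro ⟨k', hk', hkk', hc'⟩
        refine ⟨by omega, ?_⟩
        rw [show ((k : ℤ) + (y : ℤ)).toNat = k' from by omega,
          show ((k : ℤ)).toNat = k from by omega, hc', hc]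
      · rintro ⟨h1, h2⟩
        rw [show ((k : ℤ) + (y : ℤ)).toNat = k + y from by omega,
          show ((k : ℤ)).toNat = k from by omega, hc] at h2
        exact ⟨k + y, by omega, by push_cast; ring, h2⟩
    rw [hcong]
    unfold pvPos
    rw [List.countP_map, pv_countP_filter]
    rfl
  rw [pv_flatMap_map, pv_count_flatMap]
  have hmapc : ((PySem.Set.ofList l).map fun c => (pvDiffs (pvPos l c)).count ((y : ℕ) : ℤ))
      = ((PySem.Set.ofList l).map fun c => (PySem.List.enumerate l 0).countP
          (fun e => (decide (e.1 + (y : ℤ) < (l.length : ℤ)) &&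
            (l[(e.1 + (y : ℤ)).toNat]? == l[e.1.toNat]?)) && (e.2 == c))) := by
    apply List.map_congr_left
    intro c _
    exact hR c
  rw [hmapc, pv_sum_countP_swap]
  have hinner : ∀ e ∈ PySem.List.enumerate l 0,
      (PySem.Set.ofList l).countP
        (fun c => (decide (e.1 + (y : ℤ) < (l.length : ℤ)) &&
          (l[(e.1 + (y : ℤ)).toNat]? == l[e.1.toNat]?)) && (e.2 == c))
      = if (decide (e.1 + (y : ℤ) < (l.length : ℤ)) &&
          (l[(e.1 + (y : ℤ)).toNat]? == l[e.1.toNat]?)) then 1 else 0 := by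
    intro e he
    have hmem : e.2 ∈ l := by
      obtain ⟨k, hk, rfl⟩ := (PySem.List.mem_enumerate_iff l 0 e).mp he
      exact List.getElem_mem hk
    have hcongr : (PySem.Set.ofList l).countP
        (fun c => (decide (e.1 + (y : ℤ) < (l.length : ℤ)) &&
          (l[(e.1 + (y : ℤ)).toNat]? == l[e.1.toNat]?)) && (e.2 == c))
        = (PySem.Set.ofList l).countP
          (fun c => (c == e.2) && (decide (e.1 + (y : ℤ) < (l.length : ℤ)) &&
            (l[(e.1 + (y : ℤ)).toNat]? == l[e.1.toNat]?))) := by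
      apply List.countP_congr
      intro c _
      simp only [Bool.and_eq_true, beq_iff_eq]
      constructor
      · rintro ⟨h1, h2⟩; exact ⟨h2.symm, h1⟩
      · rintro ⟨h1, h2⟩; exact ⟨h2, h1.symm⟩
    rw [hcongr, pv_countP_beq_and _ (PySem.Set.nodup_ofList l) _ _]
    have hmem' : e.2 ∈ PySem.Set.ofList l := (PySem.Set.mem_ofList l e.2).mpr hmem
    by_cases hb : (decide (e.1 + (y : ℤ) < (l.length : ℤ)) &&
        (l[(e.1 + (y : ℤ)).toNat]? == l[e.1.toNat]?)) = true
    · rw [if_pos ⟨hmem', hb⟩, if_pos hb]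
    · rw [if_neg (fun h => hb h.2), if_neg hb]
  rw [List.map_congr_left hinner, pv_sum_ite_countP]
  have hfst : (PySem.List.enumerate l 0).countP
      (fun e => decide (e.1 + (y : ℤ) < (l.length : ℤ)) &&
        (l[(e.1 + (y : ℤ)).toNat]? == l[e.1.toNat]?))
      = ((PySem.List.enumerate l 0).map (fun e => e.1)).countP
        (fun q => decide (q + (y : ℤ) < (l.length : ℤ)) &&
          (l[(q + (y : ℤ)).toNat]? == l[q.toNat]?)) := by
    rw [List.countP_map]
    rfl
  rw [hfst, PySem.List.map_fst_enumerate]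
  rw [show ((0 : ℤ) + (l.length : ℤ)) = (l.length : ℤ) from by ring]
  rw [show PySem.List.pyRange 0 (l.length : ℤ) 1
        = (List.range l.length).map (fun k => ((k : ℕ) : ℤ)) from by
    rw [PySem.List.pyRange_one]
    rw [show (((l.length : ℤ)) - 0).toNat = l.length from by omega]
    apply List.map_congr_left
    intro k _
    omega]
  rw [List.countP_map]
  have hnat : (List.range l.length).countP
      ((fun q => decide (q + (y : ℤ) < (l.length : ℤ)) &&
        (l[(q + (y : ℤ)).toNat]? == l[q.toNat]?)) ∘ (fun k => ((k : ℕ) : ℤ)))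
      = (List.range l.length).countP
        (fun j => decide (j + y < l.length) && (l[j + y]? == l[j]?)) := by
    apply List.countP_congr
    intro j _
    simp only [Function.comp_apply, Bool.and_eq_true, decide_eq_true_eq, beq_iff_eq]
    rw [show (((j : ℕ) : ℤ) + (y : ℤ)).toNat = j + y from by omega,
      show (((j : ℕ) : ℤ)).toNat = j from by omega]
    constructor
    · rintro ⟨h1, h2⟩; exact ⟨by omega, h2⟩
    · rintro ⟨h1, h2⟩; exact ⟨by omega, h2⟩
  rw [hnat]
  have hsplit : List.range l.length
      = List.range (l.length - y) ++ (List.range y).map (fun k => (l.length - y) + k) := by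
    rw [← List.range_add]
    congr 1
    omega
  rw [hsplit, List.countP_append]
  have h2 : List.countP
      (fun j => decide (j + y < l.length) && (l[j + y]? == l[j]?))
      ((List.range y).map (fun k => (l.length - y) + k)) = 0 := by
    rw [List.countP_map]
    apply List.countP_eq_zero.mpr
    intro k hk
    simp only [Function.comp_apply, Bool.and_eq_true, decide_eq_true_eq]
    rintro ⟨h1, _⟩
    have := List.mem_range.mp hk
    omega
  rw [h2, Nat.add_zero]
  unfold pvCnt
  apply List.countP_congr
  intro j hj
  have hj' : j < l.length - y := List.mem_range.mp hj
  simp only [Bool.and_eq_true, decide_eq_true_eq, beq_iff_eq]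
  rw [Nat.add_comm j y]
  constructor
  · rintro ⟨_, h⟩; exact h
  · intro h; exact ⟨by omega, h⟩

theorem pv_B_eq (s : String) :
    frequenciaOcorrencias_alt s =
      PySem.List.sorted
        ((PySem.List.pyRange 1 (s.toList.length : ℤ) 1).map
          (fun x => (x, ((pvCnt s.toList x.toNat : ℕ) : ℤ))))
        (fun p => p.2) true := by
  simp only [frequenciaOcorrencias_alt]
  rw [pv_grp_values]
  have hinner : ∀ (counts : List ℤ) (ps : List ℤ),
      (PySem.List.pyRange 0 (PySem.List.len ps) 1).foldl
        (fun counts a =>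
          (PySem.List.pyRange (a + 1) (PySem.List.len ps) 1).foldl
            (fun counts b =>
              PySem.List.pySetD counts (PySem.List.pyGetD ps b 0 - PySem.List.pyGetD ps a 0)
                (PySem.List.pyGetD counts (PySem.List.pyGetD ps b 0 - PySem.List.pyGetD ps a 0) 0 + 1))
            counts)
        counts
      = (pvDiffs ps).foldl
          (fun c d => PySem.List.pySetD c d (PySem.List.pyGetD c d 0 + 1)) counts := by
    intro counts ps
    rw [← pv_diffs_port ps, ← pv_foldl_flat]
    apply PySem.List.foldl_congr_mem
    intro c a _
    rw [List.foldl_map]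
  have houter :
      ((PySem.Set.ofList s.toList).map (fun c => pvPos s.toList c)).foldl
        (fun (counts : List ℤ) ps =>
          (PySem.List.pyRange 0 (PySem.List.len ps) 1).foldl
            (fun counts a =>
              (PySem.List.pyRange (a + 1) (PySem.List.len ps) 1).foldl
                (fun counts b =>
                  PySem.List.pySetD counts (PySem.List.pyGetD ps b 0 - PySem.List.pyGetD ps a 0)
                    (PySem.List.pyGetD counts (PySem.List.pyGetD ps b 0 - PySem.List.pyGetD ps a 0) 0 + 1))
                counts)
            counts)
        (List.replicate s.toList.length (0 : ℤ))
      = ((((PySem.Set.ofList s.toList).map (fun c => pvPos s.toList c)).flatMap pvDiffs).foldl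
          (fun c d => PySem.List.pySetD c d (PySem.List.pyGetD c d 0 + 1))
          (List.replicate s.toList.length (0 : ℤ))) := by
    rw [← pv_foldl_flat]
    apply PySem.List.foldl_congr_mem
    intro c ps _
    exact hinner c ps
  rw [houter]
  congr 1
  apply List.map_congr_left
  intro x hx
  obtain ⟨hx1, hx2⟩ := PySem.List.mem_pyRange_one.mp hx
  obtain ⟨y, rfl⟩ : ∃ y : ℕ, x = (y : ℤ) := ⟨x.toNat, by omega⟩
  have hylen : y < s.toList.length := by omega
  have hbounds : ∀ d ∈ (((PySem.Set.ofList s.toList).map (fun c => pvPos s.toList c)).flatMap pvDiffs),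
      0 ≤ d ∧ d < ((List.replicate s.toList.length (0 : ℤ)).length : ℤ) := by
    intro d hd
    rw [List.length_replicate]
    obtain ⟨ps, hps, hd'⟩ := List.mem_flatMap.mp hd
    obtain ⟨c, -, rfl⟩ := List.mem_map.mp hps
    exact pv_mem_pvDiffs_bounds _ _ (pv_pairwise_pvPos s.toList c)
      (fun q hq => pv_bounds_pvPos s.toList c q hq) d hd'
  rw [pv_read_fold _ _ _ (by omega)
        (by rw [List.length_replicate]; exact_mod_cast hx2) hbounds]
  rw [pv_count_total s.toList y (by omega) hylen]
  have h0 : PySem.List.pyGetD (List.replicate s.toList.length (0 : ℤ)) ((y : ℕ) : ℤ) 0 = 0 := by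
    rw [PySem.List.pyGetD_natCast]
    by_cases h : y < s.toList.length <;> simp
  rw [h0, zero_add]
  simp

-- ===== VERDICT (by name: the statement is the Claim_ definition above) =====
theorem frequenciaOcorrencias_spec : Claim_equal_frequenciaOcorrencias := by
  intro s _hdom
  unfold Spec_frequenciaOcorrencias
  rw [pv_A_eq, pv_B_eq]
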